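-- pv_equiv track=rewrite | github.com/Sandcobra/nba_dfs | nba_dfs/test_slate.py | _parse_dk_lineup_string
-- ===== SOURCE A (Python) =====
-- _DK_LINEUP_SLOTS = {"PG", "SG", "SF", "PF", "C", "F", "G", "UTIL"}
--
-- def _parse_dk_lineup_string(lineup_str: str) -> list[str]:
--     """
--     Parse a DK contest lineup string into a list of player names.
--     Format: "PG LaMelo Ball SG Tyler Herro SF Brandon Miller PF ... UTIL ..."
--     Returns player names in slot order, skipping "LOCKED" placeholders.
--     """
--     tokens = str(lineup_str).strip().split()
--     names: list[str] = []
--     current_parts: list[str] = []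
--
--     for token in tokens:
--         if token in _DK_LINEUP_SLOTS:
--             if current_parts:
--                 name = " ".join(current_parts)
--                 if name.upper() != "LOCKED":
--                     names.append(name)
--             current_parts = []
--         else:
--             current_parts.append(token)
--
--     if current_parts:
--         name = " ".join(current_parts)
--         if name.upper() != "LOCKED":
--             names.append(name)
--
--     return names
-- ===== SOURCE B (Python) =====
-- _DK_LINEUP_SLOTS = {"PG", "SG", "SF", "PF", "C", "F", "G", "UTIL"}
--
-- def _parse_dk_lineup_string(lineup_str: str) -> list[str]:
--     """Run-splitting parse: repeatedly peel the next maximal run of non-slot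
--     tokens off the front of the token list and emit it as one name."""
--     tokens = str(lineup_str).strip().split()
--     names = []
--     while tokens:
--         if tokens[0] in _DK_LINEUP_SLOTS:
--             tokens = tokens[1:]
--             continue
--         j = 1
--         while j < len(tokens) and tokens[j] not in _DK_LINEUP_SLOTS:
--             j += 1
--         name = " ".join(tokens[:j])
--         if name.upper() != "LOCKED":
--             names.append(name)
--         tokens = tokens[j:]
--     return names
-- ===== Notes on version B (the rewrite author's own statement) =====
-- stated objective: alternative
-- what changed: Replaces the accumulate-and-flush loop (current_parts state plus a duplicated tail-flush block) with a recursive run-splitter that peels off each maximal run of non-slot tokens and emits it directly.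
import Mathlib
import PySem

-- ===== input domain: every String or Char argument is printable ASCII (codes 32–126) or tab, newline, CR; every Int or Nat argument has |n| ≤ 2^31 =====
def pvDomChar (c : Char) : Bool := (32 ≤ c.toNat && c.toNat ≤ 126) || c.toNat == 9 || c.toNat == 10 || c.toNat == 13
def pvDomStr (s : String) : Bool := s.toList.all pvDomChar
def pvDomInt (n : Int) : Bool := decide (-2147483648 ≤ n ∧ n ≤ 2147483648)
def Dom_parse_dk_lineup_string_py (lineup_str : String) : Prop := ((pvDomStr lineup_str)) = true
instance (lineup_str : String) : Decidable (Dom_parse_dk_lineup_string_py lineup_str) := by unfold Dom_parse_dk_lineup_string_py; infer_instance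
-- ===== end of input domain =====

-- B replaces A's accumulate-and-flush loop by a recursive run-splitter; objective: alternative decomposition, same behaviour.

-- ===== PORT A =====
def pvSlots : PySem.Set String :=
  PySem.Set.ofList ["PG", "SG", "SF", "PF", "C", "F", "G", "UTIL"]

def pvAStep (st : List String × List String) (token : String) : List String × List String :=
  if PySem.Set.contains pvSlots token then
    (if st.2 ≠ [] then
       (let name := PySem.Str.join " " st.2
        if PySem.Str.upper name ≠ "LOCKED" then st.1 ++ [name] else st.1)
     else st.1, [])
  else (st.1, st.2 ++ [token])

def parse_dk_lineup_string_py (lineup_str : String) : List String :=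
  let tokens := PySem.Str.split₀ (PySem.Str.strip lineup_str)
  let st := tokens.foldl pvAStep ([], [])
  if st.2 ≠ [] then
    (let name := PySem.Str.join " " st.2
     if PySem.Str.upper name ≠ "LOCKED" then st.1 ++ [name] else st.1)
  else st.1

-- ===== PORT B =====
def pvIsName (t : String) : Bool := !(PySem.Set.contains pvSlots t)

-- B's run-peeling loop ('while tokens: ...; tokens = tokens[j:]') as structural recursion
-- on the token list; the inner index scan (advance j while tokens[j] is not a slot) is
-- takeWhile/dropWhile on the same predicate: tokens[:j] / tokens[j:]
def pvGo : List String → List String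
  | [] => []
  | t :: rest =>
    if PySem.Set.contains pvSlots t then pvGo rest
    else
      let name := PySem.Str.join " " (t :: rest.takeWhile pvIsName)
      let more := pvGo (rest.dropWhile pvIsName)
      if PySem.Str.upper name = "LOCKED" then more else name :: more
termination_by ts => ts.length
decreasing_by
  · simp
  · have := List.length_dropWhile_le pvIsName rest
    simp; omega

def parse_dk_lineup_string_py_alt (lineup_str : String) : List String :=
  pvGo (PySem.Str.split₀ (PySem.Str.strip lineup_str))

-- ===== PRECONDITION & SPEC =====
def Spec_parse_dk_lineup_string_py (lineup_str : String) (out : List String) : Prop := out = parse_dk_lineup_string_py_alt lineup_str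
instance (lineup_str : String) (out : List String) : Decidable (Spec_parse_dk_lineup_string_py lineup_str out) := by unfold Spec_parse_dk_lineup_string_py; infer_instance

-- ===== CLAIM (what is proved, stated in full; the proofs are below) =====
def Claim_equal_parse_dk_lineup_string_py : Prop := ∀ (lineup_str : String), Dom_parse_dk_lineup_string_py lineup_str → Spec_parse_dk_lineup_string_py lineup_str (parse_dk_lineup_string_py lineup_str)

-- ===== LEMMAS AND PROOFS =====

-- what A's flush block appends for a pending run (empty run appends nothing)
def pvEmit (run : List String) : List String :=
  if run = [] then []
  else if PySem.Str.upper (PySem.Str.join " " run) = "LOCKED" then []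
  else [PySem.Str.join " " run]

lemma pvGo_eq_emit (ts : List String) :
    pvGo ts = pvEmit (ts.takeWhile pvIsName) ++ pvGo (ts.dropWhile pvIsName) := by
  cases ts with
  | nil => simp [pvGo, pvEmit]
  | cons t rest =>
    by_cases h : t ∈ pvSlots
    · simp [pvGo, pvEmit, pvIsName, h]
    · rw [pvGo]
      simp only [pvIsName, List.takeWhile_cons, List.dropWhile_cons]
      simp only [PySem.Set.contains, List.contains_eq_mem, h,
        decide_false, Bool.not_false, if_true]
      rw [pvEmit, if_neg (by simp)]
      split <;> simp

lemma pvFlush_eq_emit (names cur : List String) :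
    (if cur ≠ [] then
       (let name := PySem.Str.join " " cur
        if PySem.Str.upper name ≠ "LOCKED" then names ++ [name] else names)
     else names) = names ++ pvEmit cur := by
  by_cases hc : cur = []
  · simp [hc, pvEmit]
  · simp only [pvEmit, ne_eq, hc, not_false_eq_true, if_true]
    split <;> simp_all

lemma pvInv (ts : List String) : ∀ (names cur : List String),
    (let st := ts.foldl pvAStep (names, cur)
     if st.2 ≠ [] then
       (let name := PySem.Str.join " " st.2
        if PySem.Str.upper name ≠ "LOCKED" then st.1 ++ [name] else st.1)
     else st.1)
    = names ++ pvEmit (cur ++ ts.takeWhile pvIsName) ++ pvGo (ts.dropWhile pvIsName) := by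
  induction ts with
  | nil =>
    intro names cur
    simpa [pvGo] using pvFlush_eq_emit names cur
  | cons t rest ih =>
    intro names cur
    by_cases h : t ∈ pvSlots
    · have hstep : pvAStep (names, cur) t = (names ++ pvEmit cur, []) := by
        rw [pvAStep, if_pos (by simp [h])]
        rw [show ((if cur ≠ [] then
             (let name := PySem.Str.join " " cur
              if PySem.Str.upper name ≠ "LOCKED" then names ++ [name] else names)
           else names) = names ++ pvEmit cur) from pvFlush_eq_emit names cur]
      have hgo : pvGo (t :: rest) = pvGo rest := by
        rw [pvGo, if_pos (by simp [h])]
      simp only [List.foldl_cons, hstep]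
      rw [ih (names ++ pvEmit cur) []]
      simp only [pvIsName, List.takeWhile_cons, List.dropWhile_cons,
        PySem.Set.contains, List.contains_eq_mem, h,
        decide_true, Bool.not_true, List.nil_append, ← pvGo_eq_emit rest, List.append_assoc]
      simp [hgo]
    · have hstep : pvAStep (names, cur) t = (names, cur ++ [t]) := by
        rw [pvAStep, if_neg (by simp [h])]
      simp only [List.foldl_cons, hstep]
      rw [ih names (cur ++ [t])]
      simp [pvIsName, List.takeWhile_cons, List.dropWhile_cons, h]

-- ===== VERDICT (by name: the statement is the Claim_ definition above) =====
theorem parse_dk_lineup_string_py_spec : Claim_equal_parse_dk_lineup_string_py := by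
  intro s _
  show parse_dk_lineup_string_py s = parse_dk_lineup_string_py_alt s
  unfold parse_dk_lineup_string_py parse_dk_lineup_string_py_alt
  rw [pvInv]
  simp [← pvGo_eq_emit]
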